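-- pv_equiv track=rewrite | github.com/MohaKhalili/MyPy_TinyCodes | 13 - Week 7/02 Multidimentional lists/03 Multidimensional Lists Exercise 3 (Maximum Even Value of a 2-D List).py | Maximum_Even_Value_of_2D_List
-- ===== SOURCE A (Python) =====
-- def Maximum_Even_Value_of_2D_List(my_list):
--     new_list = []
--     for item in my_list:
--         for element in item:
--             if element % 2 == 0:
--                 new_list.append(element)
--     if new_list != []:
--         max_num = new_list[0]
--         for i in new_list:
--             if i > max_num:
--                 max_num = i
--         return max_num
--     else:
--         return None
-- ===== SOURCE B (Python) =====
-- def Maximum_Even_Value_of_2D_List(my_list):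
--     best = None
--     for row in my_list:
--         for element in row:
--             if element % 2 == 0:
--                 if best is None or element > best:
--                     best = element
--     return best
-- ===== Notes on version B (the rewrite author's own statement) =====
-- stated objective: simpler
-- what changed: B replaces A's two phases (build a list of all evens, then scan it for the maximum) with a single pass keeping an Optional running maximum, allocating no intermediate list.
import Mathlib
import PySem

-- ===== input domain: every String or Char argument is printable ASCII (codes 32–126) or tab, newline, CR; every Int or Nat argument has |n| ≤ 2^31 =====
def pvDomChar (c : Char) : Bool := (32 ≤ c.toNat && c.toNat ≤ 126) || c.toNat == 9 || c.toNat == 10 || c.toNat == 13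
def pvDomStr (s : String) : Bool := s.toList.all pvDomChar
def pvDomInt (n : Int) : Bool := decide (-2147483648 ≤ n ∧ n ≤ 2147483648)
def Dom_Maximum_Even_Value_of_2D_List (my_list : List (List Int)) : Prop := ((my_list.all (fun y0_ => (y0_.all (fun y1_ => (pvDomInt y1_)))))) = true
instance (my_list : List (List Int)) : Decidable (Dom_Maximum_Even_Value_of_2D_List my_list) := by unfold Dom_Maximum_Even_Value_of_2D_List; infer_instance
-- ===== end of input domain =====

-- B collapses A's two phases (collect all evens into a list, then scan that list for its
-- maximum) into one pass over the input keeping an Option running maximum; simpler, O(1) space.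

-- ===== PORT A =====
-- the inner 'for element in item: if element % 2 == 0: new_list.append(element)'
def pvAInner (acc : List Int) (item : List Int) : List Int :=
  item.foldl (fun acc element => if PySem.Int.mod element 2 = 0 then acc ++ [element] else acc) acc

def Maximum_Even_Value_of_2D_List (my_list : List (List Int)) : Option Int :=
  let new_list := my_list.foldl pvAInner []
  match new_list with
  | [] => none      -- 'else: return None'
  | h :: t => some ((h :: t).foldl (fun max_num i => if i > max_num then i else max_num) h)

-- ===== PORT B =====
-- 'if element % 2 == 0: if best is None or element > best: best = element'
def pvBStep (best : Option Int) (element : Int) : Option Int :=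
  if PySem.Int.mod element 2 = 0 then
    match best with
    | none => some element
    | some m => if element > m then some element else best
  else best

def Maximum_Even_Value_of_2D_List_alt (my_list : List (List Int)) : Option Int :=
  my_list.foldl (fun best row => row.foldl pvBStep best) none

-- ===== PRECONDITION & SPEC =====
def Spec_Maximum_Even_Value_of_2D_List (my_list : List (List Int)) (out : Option Int) : Prop := out = Maximum_Even_Value_of_2D_List_alt my_list
instance (my_list : List (List Int)) (out : Option Int) : Decidable (Spec_Maximum_Even_Value_of_2D_List my_list out) := by unfold Spec_Maximum_Even_Value_of_2D_List; infer_instance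

-- ===== CLAIM (what is proved, stated in full; the proofs are below) =====
def Claim_equal_Maximum_Even_Value_of_2D_List : Prop := ∀ (my_list : List (List Int)), Dom_Maximum_Even_Value_of_2D_List my_list → Spec_Maximum_Even_Value_of_2D_List my_list (Maximum_Even_Value_of_2D_List my_list)

-- ===== LEMMAS AND PROOFS =====
-- A's second phase, as a function of the collected list
def pvScan (l : List Int) : Option Int :=
  match l with
  | [] => none
  | h :: t => some ((h :: t).foldl (fun max_num i => if i > max_num then i else max_num) h)

theorem pvScan_append (h e : Int) (t : List Int) :
    pvScan (h :: (t ++ [e])) =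
      some (if e > (h :: t).foldl (fun max_num i => if i > max_num then i else max_num) h then e
            else (h :: t).foldl (fun max_num i => if i > max_num then i else max_num) h) := by
  simp [pvScan, List.foldl_append]

theorem pvScan_step (acc : List Int) (e : Int) :
    pvScan (if PySem.Int.mod e 2 = 0 then acc ++ [e] else acc) = pvBStep (pvScan acc) e := by
  unfold pvBStep
  by_cases he : PySem.Int.mod e 2 = 0
  · rw [if_pos he, if_pos he]
    cases acc with
    | nil => simp [pvScan]
    | cons h t =>
        rw [show (h :: t) ++ [e] = h :: (t ++ [e]) from rfl, pvScan_append]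
        rw [show pvScan (h :: t)
              = some ((h :: t).foldl (fun max_num i => if i > max_num then i else max_num) h) from rfl]
        split <;> simp_all
  · rw [if_neg he, if_neg he]

theorem pvScan_row (row : List Int) (acc : List Int) :
    pvScan (pvAInner acc row) = row.foldl pvBStep (pvScan acc) := by
  induction row generalizing acc with
  | nil => simp [pvAInner]
  | cons e rest ih =>
      simp only [pvAInner, List.foldl_cons] at *
      rw [ih, pvScan_step]

theorem pvScan_rows (rows : List (List Int)) (acc : List Int) :
    pvScan (rows.foldl pvAInner acc) =
      rows.foldl (fun best row => row.foldl pvBStep best) (pvScan acc) := by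
  induction rows generalizing acc with
  | nil => rfl
  | cons row rest ih => simp only [List.foldl_cons, ih, pvScan_row]

theorem ports_agree (my_list : List (List Int)) :
    Maximum_Even_Value_of_2D_List my_list = Maximum_Even_Value_of_2D_List_alt my_list := by
  have h := pvScan_rows my_list []
  simpa [Maximum_Even_Value_of_2D_List, Maximum_Even_Value_of_2D_List_alt, pvScan] using h

-- ===== VERDICT (by name: the statement is the Claim_ definition above) =====
theorem Maximum_Even_Value_of_2D_List_spec : Claim_equal_Maximum_Even_Value_of_2D_List := by
  intro my_list _
  exact ports_agree my_list
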